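-- pv_equiv track=rewrite | github.com/Boman/CityPlanner | src/bruteForceSearch.py | tilesInterleave
-- ===== SOURCE A (Python) =====
-- def tilesInterleave(xDelta, yDelta, tile1, tile2):
--     for y, tile1Line in enumerate(tile1):
--         if 0 <= y - yDelta < len(tile2):
--             for x, tile1Entry in enumerate(tile1Line):
--                 if 0 <= x - xDelta < len(tile2[y - yDelta]):
--                     if tile1Entry == 1 and tile2[y - yDelta][x - xDelta] == 1:
--                         return True
--     return False
-- ===== SOURCE B (Python) =====
-- def tilesInterleave(xDelta, yDelta, tile1, tile2):
--     s1 = {(x, y) for y, row in enumerate(tile1) for x, v in enumerate(row) if v == 1}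
--     s2 = {(x + xDelta, y + yDelta) for y, row in enumerate(tile2) for x, v in enumerate(row) if v == 1}
--     return not s1.isdisjoint(s2)
-- ===== Notes on version B (the rewrite author's own statement) =====
-- stated objective: simpler
-- what changed: Replaces the per-cell bounds-checked nested scan of tile1 with an index-then-intersect pass: build the set of 1-coordinates of each tile (tile2's shifted by (xDelta,yDelta)) and report overlap iff the two sets are not disjoint.
import Mathlib
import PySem

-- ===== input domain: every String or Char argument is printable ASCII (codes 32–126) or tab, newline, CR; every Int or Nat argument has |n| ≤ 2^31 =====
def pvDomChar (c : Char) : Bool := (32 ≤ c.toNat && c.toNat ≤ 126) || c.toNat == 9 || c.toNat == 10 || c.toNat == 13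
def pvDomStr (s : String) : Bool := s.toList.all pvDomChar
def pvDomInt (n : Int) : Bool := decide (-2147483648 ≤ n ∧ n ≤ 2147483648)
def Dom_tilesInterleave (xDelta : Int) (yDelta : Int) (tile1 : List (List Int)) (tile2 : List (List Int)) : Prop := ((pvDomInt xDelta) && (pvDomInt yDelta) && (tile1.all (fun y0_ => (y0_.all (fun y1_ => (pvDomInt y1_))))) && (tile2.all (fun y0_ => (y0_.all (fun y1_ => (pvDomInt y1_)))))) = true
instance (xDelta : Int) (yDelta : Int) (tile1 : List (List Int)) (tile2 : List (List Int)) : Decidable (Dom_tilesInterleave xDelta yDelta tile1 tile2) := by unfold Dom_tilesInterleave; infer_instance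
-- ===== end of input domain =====

-- ===== PORT A =====
-- B builds coordinate sets of 1-cells and intersects them instead of A's bounds-checked nested scan (objective: simpler).
def tilesInterleave (xDelta : Int) (yDelta : Int) (tile1 : List (List Int)) (tile2 : List (List Int)) : Bool :=
  (PySem.List.enumerate tile1 0).any (fun p =>
    if 0 ≤ p.1 - yDelta ∧ p.1 - yDelta < (tile2.length : Int) then
      (PySem.List.enumerate p.2 0).any (fun q =>
        if 0 ≤ q.1 - xDelta ∧ q.1 - xDelta < ((PySem.List.pyGetD tile2 (p.1 - yDelta) []).length : Int) then
          q.2 == 1 && PySem.List.pyGetD (PySem.List.pyGetD tile2 (p.1 - yDelta) []) (q.1 - xDelta) 0 == 1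
        else false)
    else false)

-- ===== PORT B =====
-- the list of (x, y) coordinates whose cell equals 1 (the elements of B's set comprehension, in generation order)
def pvOnes (tile : List (List Int)) : List (Int × Int) :=
  (PySem.List.enumerate tile 0).flatMap (fun p =>
    (PySem.List.enumerate p.2 0).filterMap (fun q => if q.2 = 1 then some (q.1, p.1) else none))

def tilesInterleave_alt (xDelta : Int) (yDelta : Int) (tile1 : List (List Int)) (tile2 : List (List Int)) : Bool :=
  let s1 : PySem.Set (Int × Int) := PySem.Set.ofList (pvOnes tile1)
  let s2 : PySem.Set (Int × Int) := PySem.Set.ofList ((pvOnes tile2).map (fun p => (p.1 + xDelta, p.2 + yDelta)))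
  !(PySem.Set.isdisjoint s1 s2)

-- ===== PRECONDITION & SPEC =====
def Spec_tilesInterleave (xDelta : Int) (yDelta : Int) (tile1 : List (List Int)) (tile2 : List (List Int)) (out : Bool) : Prop := out = tilesInterleave_alt xDelta yDelta tile1 tile2
instance (xDelta : Int) (yDelta : Int) (tile1 : List (List Int)) (tile2 : List (List Int)) (out : Bool) : Decidable (Spec_tilesInterleave xDelta yDelta tile1 tile2 out) := by unfold Spec_tilesInterleave; infer_instance

-- ===== CLAIM (what is proved, stated in full; the proofs are below) =====
def Claim_equal_tilesInterleave : Prop := ∀ (xDelta : Int) (yDelta : Int) (tile1 : List (List Int)) (tile2 : List (List Int)), Dom_tilesInterleave xDelta yDelta tile1 tile2 → Spec_tilesInterleave xDelta yDelta tile1 tile2 (tilesInterleave xDelta yDelta tile1 tile2)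

-- ===== LEMMAS AND PROOFS =====

-- the common existential both programs decide
def pvHit (xDelta yDelta : Int) (tile1 tile2 : List (List Int)) : Prop :=
  ∃ p, p ∈ pvOnes tile1 ∧ (p.1 - xDelta, p.2 - yDelta) ∈ pvOnes tile2

lemma mem_pvOnes (tile : List (List Int)) (a b : Int) :
    (a, b) ∈ pvOnes tile ↔
      ∃ (j : Nat) (hj : j < tile.length) (i : Nat) (hi : i < tile[j].length),
        tile[j][i] = 1 ∧ a = (i : Int) ∧ b = (j : Int) := by
  simp only [pvOnes, List.mem_flatMap, List.mem_filterMap, PySem.List.mem_enumerate_iff]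
  constructor
  · rintro ⟨p, ⟨j, hj, rfl⟩, q, ⟨i, hi, rfl⟩, hq⟩
    simp only [zero_add] at *
    split at hq
    · rename_i h1
      obtain ⟨rfl, rfl⟩ := Prod.mk.injEq .. ▸ Option.some.injEq .. ▸ hq
      exact ⟨j, hj, i, hi, h1, by simp_all⟩
    · exact absurd hq (by simp)
  · rintro ⟨j, hj, i, hi, h1, rfl, rfl⟩
    exact ⟨(j, tile[j]), ⟨j, hj, by simp⟩, (i, tile[j][i]), ⟨i, hi, by simp⟩, by simp [h1]⟩

lemma alt_iff (xDelta yDelta : Int) (tile1 tile2 : List (List Int)) :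
    tilesInterleave_alt xDelta yDelta tile1 tile2 = true ↔ pvHit xDelta yDelta tile1 tile2 := by
  simp only [tilesInterleave_alt, Bool.not_eq_eq_eq_not, Bool.not_true,
    ← Bool.not_eq_true, PySem.Set.isdisjoint_iff, pvHit]
  rw [not_forall]
  constructor
  · rintro ⟨⟨pa, pb⟩, hp⟩
    rw [Classical.not_imp] at hp
    obtain ⟨hp1, hp2⟩ := hp
    rw [not_not] at hp2
    rw [PySem.Set.mem_ofList] at hp1 hp2
    rw [List.mem_map] at hp2
    obtain ⟨⟨qa, qb⟩, hq, hqe⟩ := hp2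
    refine ⟨(pa, pb), hp1, ?_⟩
    have : ((pa, pb).1 - xDelta, (pa, pb).2 - yDelta) = (qa, qb) := by
      simp only [Prod.mk.injEq] at hqe ⊢
      omega
    rwa [this]
  · rintro ⟨⟨pa, pb⟩, hp1, hp2⟩
    refine ⟨(pa, pb), ?_⟩
    rw [Classical.not_imp, not_not, PySem.Set.mem_ofList, PySem.Set.mem_ofList, List.mem_map]
    exact ⟨hp1, ⟨(pa - xDelta, pb - yDelta), hp2, by simp⟩⟩

lemma a_iff (xDelta yDelta : Int) (tile1 tile2 : List (List Int)) :
    tilesInterleave xDelta yDelta tile1 tile2 = true ↔ pvHit xDelta yDelta tile1 tile2 := by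
  simp only [tilesInterleave, List.any_eq_true, pvHit]
  constructor
  · rintro ⟨p, hpmem, hp⟩
    rw [PySem.List.mem_enumerate_iff] at hpmem
    obtain ⟨j, hj, rfl⟩ := hpmem
    simp only [zero_add] at hp
    split at hp
    · rename_i hg
      rw [List.any_eq_true] at hp
      obtain ⟨q, hqmem, hq⟩ := hp
      rw [PySem.List.mem_enumerate_iff] at hqmem
      obtain ⟨i, hi, rfl⟩ := hqmem
      simp only [zero_add] at hq
      split at hq
      · rename_i hg2
        rw [Bool.and_eq_true, beq_iff_eq, beq_iff_eq] at hq
        obtain ⟨h1, h2⟩ := hq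
        -- name the natural indices into tile2
        obtain ⟨j2, hj2⟩ : ∃ j2 : Nat, (j2 : Int) = (j : Int) - yDelta := ⟨((j : Int) - yDelta).toNat, by omega⟩
        have hj2lt : j2 < tile2.length := by omega
        have hrow : PySem.List.pyGetD tile2 ((j : Int) - yDelta) [] = tile2[j2] := by
          rw [← hj2, PySem.List.pyGetD_natCast, List.getD_eq_getElem _ _ hj2lt]
        rw [hrow] at hg2 h2
        obtain ⟨i2, hi2⟩ : ∃ i2 : Nat, (i2 : Int) = (i : Int) - xDelta := ⟨((i : Int) - xDelta).toNat, by omega⟩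
        have hi2lt : i2 < tile2[j2].length := by omega
        rw [← hi2, PySem.List.pyGetD_natCast, List.getD_eq_getElem _ _ hi2lt] at h2
        refine ⟨((i : Int), (j : Int)), (mem_pvOnes ..).2 ⟨j, hj, i, hi, h1, rfl, rfl⟩, ?_⟩
        exact (mem_pvOnes ..).2 ⟨j2, hj2lt, i2, hi2lt, h2, by omega, by omega⟩
      · exact absurd hq (by simp)
    · exact absurd hp (by simp)
  · rintro ⟨⟨a, b⟩, hp1, hp2⟩
    rw [mem_pvOnes] at hp1 hp2
    obtain ⟨j, hj, i, hi, h1, rfl, rfl⟩ := hp1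
    obtain ⟨j2, hj2, i2, hi2, h2, hie, hje⟩ := hp2
    refine ⟨(j, tile1[j]), ?_, ?_⟩
    · rw [PySem.List.mem_enumerate_iff]; exact ⟨j, hj, by simp⟩
    have hrow : PySem.List.pyGetD tile2 ((j : Int) - yDelta) [] = tile2[j2] := by
      have : (j : Int) - yDelta = (j2 : Int) := by omega
      rw [this, PySem.List.pyGetD_natCast, List.getD_eq_getElem _ _ hj2]
    rw [if_pos (by constructor <;> omega), List.any_eq_true]
    refine ⟨(i, tile1[j][i]), ?_, ?_⟩
    · rw [PySem.List.mem_enumerate_iff]; exact ⟨i, hi, by simp⟩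
    simp only [hrow]
    rw [if_pos (by constructor <;> omega)]
    have hcell : PySem.List.pyGetD tile2[j2] ((i : Int) - xDelta) 0 = tile2[j2][i2] := by
      have : (i : Int) - xDelta = (i2 : Int) := by omega
      rw [this, PySem.List.pyGetD_natCast, List.getD_eq_getElem _ _ hi2]
    simp [h1, hcell, h2]

-- ===== VERDICT (by name: the statement is the Claim_ definition above) =====
theorem tilesInterleave_spec : Claim_equal_tilesInterleave := by
  intro xDelta yDelta tile1 tile2 _
  unfold Spec_tilesInterleave
  rw [Bool.eq_iff_iff, a_iff, alt_iff]
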